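-- pv_equiv track=rewrite | github.com/suceleste/Licence-Info | TP Algo/TP06-Dictionnaires/__Main__.py | convient
-- ===== SOURCE A (Python) =====
-- def convient(rep : list, categ : list, classi : dict) -> bool :
--     verif = False
--     for k, v in classi.items() :
--         for e in rep :
--             if e in v :
--                 verif = True
--         if not verif :
--             return verif
--         verif = False
--     return True
-- ===== SOURCE B (Python) =====
-- def convient(rep: list, categ: list, classi: dict) -> bool:
--     # Shrinking-worklist: walk rep once, pruning the list of still-uncovered
--     # category value-lists; succeed as soon as the worklist is empty.
--     pending = list(classi.values())
--     for e in rep: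
--         pending = [v for v in pending if e not in v]
--         if not pending:
--             return True
--     return not pending
-- ===== Notes on version B (the rewrite author's own statement) =====
-- stated objective: alternative
-- what changed: Inverts the traversal: instead of A's loop over categories with an inner scan of rep and a per-category flag, B makes a single pass over rep maintaining a shrinking worklist of still-uncovered category value-lists, pruning it at each element and succeeding early once it is empty.
import Mathlib
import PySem

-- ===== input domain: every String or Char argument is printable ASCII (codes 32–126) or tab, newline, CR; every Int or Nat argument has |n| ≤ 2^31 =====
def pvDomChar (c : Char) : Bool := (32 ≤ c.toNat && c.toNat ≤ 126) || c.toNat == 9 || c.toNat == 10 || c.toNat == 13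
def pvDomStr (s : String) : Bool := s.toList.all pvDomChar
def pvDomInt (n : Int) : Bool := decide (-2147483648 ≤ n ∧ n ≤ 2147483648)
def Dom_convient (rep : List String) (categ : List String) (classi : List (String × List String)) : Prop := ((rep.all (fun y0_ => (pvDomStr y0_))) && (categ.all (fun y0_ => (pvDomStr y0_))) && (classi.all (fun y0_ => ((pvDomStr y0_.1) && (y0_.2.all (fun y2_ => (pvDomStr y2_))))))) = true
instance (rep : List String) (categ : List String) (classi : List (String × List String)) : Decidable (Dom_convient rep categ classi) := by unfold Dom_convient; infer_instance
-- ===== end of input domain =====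

-- B inverts the traversal: one pass over rep pruning a worklist of still-uncovered category value-lists (early success when empty), instead of A's per-category flag loop.


-- ===== PORT A =====
def convient (rep : List String) (categ : List String) (classi : List (String × List String)) : Bool :=
  match classi with
  | [] => true
  | (_, v) :: rest =>
      let verif := rep.foldl (fun verif e => if v.contains e then true else verif) false
      if !verif then verif
      else convient rep categ rest

-- ===== PORT B =====
-- the loop over rep of Source B: prune the worklist, return True early when empty
def convientAltGo (pending : List (List String)) : List String → Bool
  | [] => pending.isEmpty
  | e :: rest =>
      let pending' := pending.filter (fun v => !(v.contains e))
      if pending'.isEmpty then true else convientAltGo pending' rest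

def convient_alt (rep : List String) (categ : List String) (classi : List (String × List String)) : Bool :=
  convientAltGo (classi.map (fun kv => kv.2)) rep

-- ===== PRECONDITION & SPEC =====
def Spec_convient (rep : List String) (categ : List String) (classi : List (String × List String)) (out : Bool) : Prop := out = convient_alt rep categ classi
instance (rep : List String) (categ : List String) (classi : List (String × List String)) (out : Bool) : Decidable (Spec_convient rep categ classi out) := by unfold Spec_convient; infer_instance

-- ===== CLAIM (what is proved, stated in full; the proofs are below) =====
def Claim_equal_convient : Prop := ∀ (rep : List String) (categ : List String) (classi : List (String × List String)), Dom_convient rep categ classi → Spec_convient rep categ classi (convient rep categ classi)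

-- ===== LEMMAS AND PROOFS =====

theorem foldA_eq_any (v : List String) (rep : List String) (b : Bool) :
    rep.foldl (fun verif e => if v.contains e then true else verif) b
      = (b || rep.any (fun e => v.contains e)) := by
  induction rep generalizing b with
  | nil => simp
  | cons e t ih =>
    simp only [List.foldl_cons, List.any_cons, ih]
    cases hc : v.contains e <;> simp

theorem convient_eq_all (rep : List String) (categ : List String)
    (classi : List (String × List String)) :
    convient rep categ classi
      = classi.all (fun kv => rep.any (fun e => kv.2.contains e)) := by
  induction classi with
  | nil => rfl
  | cons kv rest ih =>
    obtain ⟨k, v⟩ := kv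
    simp only [convient, foldA_eq_any, Bool.false_or, List.all_cons, ih]
    cases h : rep.any (fun e => v.contains e) <;> simp

theorem all_filter_or (e : String) (P : List String → Bool) (pending : List (List String)) :
    (pending.filter (fun v => !(v.contains e))).all P
      = pending.all (fun v => v.contains e || P v) := by
  induction pending with
  | nil => rfl
  | cons v t ih =>
    by_cases h : e ∈ v <;>
      simp [List.all_cons, h]

theorem convientAltGo_eq_all (rep : List String) (pending : List (List String)) :
    convientAltGo pending rep = pending.all (fun v => rep.any (fun e => v.contains e)) := by
  induction rep generalizing pending with
  | nil => cases pending <;> simp [convientAltGo]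
  | cons e rest ih =>
    simp only [convientAltGo, List.any_cons]
    rw [← all_filter_or e (fun v => rest.any (fun x => v.contains x)) pending]
    split
    · next h =>
      rw [List.isEmpty_iff] at h
      rw [h]
      rfl
    · exact ih _

-- ===== VERDICT (by name: the statement is the Claim_ definition above) =====
theorem convient_spec : Claim_equal_convient := by
  intro rep categ classi _
  unfold Spec_convient convient_alt
  rw [convient_eq_all, convientAltGo_eq_all, List.all_map]
  rfl
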